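-- pv_equiv track=rewrite | github.com/bitwisecook/tcl-lsp | vm/commands/regexp_cmds.py | _tcl_list_element
-- ===== SOURCE A (Python) =====
-- def _tcl_list_element(s: str) -> str:
--     """Format a string as a Tcl list element, quoting if needed."""
--     if s == "":
--         return "{}"
--     # Characters that require bracing
--     needs_quoting = False
--     for ch in s:
--         if ch in ' \t\n\\{}"$;':
--             needs_quoting = True
--             break
--     if not needs_quoting:
--         return s
--     # If no unbalanced braces, brace it
--     depth = 0
--     has_bad_braces = False
--     for ch in s:
--         if ch == "{":
--             depth += 1
--         elif ch == "}":
--             depth -= 1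
--             if depth < 0:
--                 has_bad_braces = True
--                 break
--     if depth != 0:
--         has_bad_braces = True
--     if not has_bad_braces:
--         return "{" + s + "}"
--     # Backslash-quote special chars
--     result: list[str] = []
--     for ch in s:
--         if ch in ' \t\n\\{}"$;':
--             result.append("\\")
--         result.append(ch)
--     return "".join(result)
-- ===== SOURCE B (Python) =====
-- SPECIAL = ' \t\n\\{}"$;'
--
-- def _tcl_list_element(s: str) -> str:
--     """Format a string as a Tcl list element, quoting if needed."""
--     if s == "":
--         return "{}"
--     # One combined pass: special-char flag, brace depth / negative-depth flag,
--     # and the backslash-escaped form, all at once.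
--     needs_quoting = False
--     depth = 0
--     went_negative = False
--     escaped = []
--     for ch in s:
--         if ch in SPECIAL:
--             needs_quoting = True
--             escaped.append("\\")
--         escaped.append(ch)
--         if ch == "{":
--             depth += 1
--         elif ch == "}":
--             depth -= 1
--             if depth < 0:
--                 went_negative = True
--     if not needs_quoting:
--         return s
--     if depth == 0 and not went_negative:
--         return "{" + s + "}"
--     return "".join(escaped)
-- ===== Notes on version B (the rewrite author's own statement) =====
-- stated objective: alternative
-- what changed: Replaces A's three separate short-circuiting scans over s (special-char test, brace-balance test, escape pass) with one combined loop that maintains all three results simultaneously, followed by a single decision block.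
import Mathlib
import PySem

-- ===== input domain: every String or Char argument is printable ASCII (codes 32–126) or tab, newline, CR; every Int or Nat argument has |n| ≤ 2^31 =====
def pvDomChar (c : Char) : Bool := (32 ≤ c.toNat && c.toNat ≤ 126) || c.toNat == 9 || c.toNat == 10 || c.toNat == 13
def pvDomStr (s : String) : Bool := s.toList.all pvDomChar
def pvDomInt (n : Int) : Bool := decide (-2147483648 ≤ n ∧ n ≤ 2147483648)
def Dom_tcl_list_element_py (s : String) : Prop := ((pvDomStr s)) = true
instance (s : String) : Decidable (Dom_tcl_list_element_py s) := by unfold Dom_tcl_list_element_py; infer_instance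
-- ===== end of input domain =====

-- B replaces A's three separate short-circuiting scans over s with one combined pass that
-- maintains the special-char flag, brace depth / went-negative flag and the escaped form at once
-- (objective: alternative decomposition, same O(n) cost).

-- ===== PORT A =====
def pvSpecial (c : Char) : Bool :=
  c == ' ' || c == '\t' || c == '\n' || c == '\\' || c == '{' || c == '}' || c == '"' || c == '$' || c == ';'

-- A's first loop: scan with early break for a special character
def aNeeds : List Char → Bool
  | [] => false
  | c :: r => if pvSpecial c then true else aNeeds r

-- A's second loop: brace depth, breaking as soon as the depth goes negative
def aBrace : List Char → Int → Int × Bool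
  | [], d => (d, false)
  | c :: r, d =>
    if c == '{' then aBrace r (d + 1)
    else if c == '}' then
      (if d - 1 < 0 then (d - 1, true) else aBrace r (d - 1))
    else aBrace r d

-- A's third loop: backslash-escape special characters
def aEsc : List Char → List Char
  | [] => []
  | c :: r => (if pvSpecial c then ['\\', c] else [c]) ++ aEsc r

def tcl_list_element_py (s : String) : String :=
  if s = "" then "{}"
  else if aNeeds s.toList = false then s
  else
    let r := aBrace s.toList 0
    let bad : Bool := if r.2 then true else (if r.1 != 0 then true else false)
    if bad = false then "{" ++ s ++ "}"
    else String.mk (aEsc s.toList)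

-- ===== PORT B =====
-- B: one combined pass maintaining (needs_quoting, depth, went_negative, escaped)
def bStep (st : Bool × Int × Bool × List Char) (c : Char) : Bool × Int × Bool × List Char :=
  let nq := st.1 || pvSpecial c
  let esc := st.2.2.2 ++ (if pvSpecial c then ['\\', c] else [c])
  let d := if c == '{' then st.2.1 + 1 else if c == '}' then st.2.1 - 1 else st.2.1
  let neg := st.2.2.1 || (decide (d < 0) && (c == '}'))
  (nq, d, neg, esc)

def tcl_list_element_py_alt (s : String) : String :=
  if s = "" then "{}"
  else
    let r := s.toList.foldl bStep (false, 0, false, [])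
    if r.1 = false then s
    else if r.2.1 = 0 ∧ r.2.2.1 = false then "{" ++ s ++ "}"
    else String.mk r.2.2.2

-- ===== PRECONDITION & SPEC =====
def Spec_tcl_list_element_py (s : String) (out : String) : Prop := out = tcl_list_element_py_alt s
instance (s : String) (out : String) : Decidable (Spec_tcl_list_element_py s out) := by unfold Spec_tcl_list_element_py; infer_instance

-- ===== CLAIM (what is proved, stated in full; the proofs are below) =====
def Claim_equal_tcl_list_element_py : Prop := ∀ (s : String), Dom_tcl_list_element_py s → Spec_tcl_list_element_py s (tcl_list_element_py s)

-- ===== LEMMAS AND PROOFS =====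
-- final depth of a full (no-break) scan
def dFinal : List Char → Int → Int
  | [], d => d
  | c :: r, d => dFinal r (if c == '{' then d + 1 else if c == '}' then d - 1 else d)

-- whether the depth ever goes negative at a '}' during a full scan
def negEver : List Char → Int → Bool
  | [], _ => false
  | c :: r, d =>
    let d' := if c == '{' then d + 1 else if c == '}' then d - 1 else d
    (decide (d' < 0) && (c == '}')) || negEver r d'

theorem foldl_bStep_char (l : List Char) : ∀ (nq neg : Bool) (d : Int) (acc : List Char),
    l.foldl bStep (nq, d, neg, acc) =
      (nq || aNeeds l, dFinal l d, neg || negEver l d, acc ++ aEsc l) := by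
  induction l with
  | nil => intro nq neg d acc; simp [aNeeds, dFinal, negEver, aEsc]
  | cons c r ih =>
    intro nq neg d acc
    simp only [List.foldl_cons, bStep, ih, aNeeds, dFinal, negEver, aEsc]
    by_cases h : pvSpecial c <;> simp [h, Bool.or_assoc, List.append_assoc]

-- A's early-break brace scan agrees with the full scan on the combined badness test
theorem aBrace_bad (l : List Char) : ∀ (d : Int),
    ((aBrace l d).2 || ((aBrace l d).1 != 0)) = (negEver l d || (dFinal l d != 0)) := by
  induction l with
  | nil => intro d; simp [aBrace, negEver, dFinal]
  | cons c r ih =>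
    intro d
    by_cases h1 : c = '{'
    · subst h1
      simp only [aBrace, negEver, dFinal]
      simpa using ih (d + 1)
    · by_cases h2 : c = '}'
      · subst h2
        by_cases h3 : d - 1 < 0
        · simp only [aBrace, negEver, dFinal]
          simp [h3]
        · simp only [aBrace, negEver, dFinal]
          simp [h3]
          simpa using ih (d - 1)
      · have h1' : (c == '{') = false := by simp [h1]
        have h2' : (c == '}') = false := by simp [h2]
        simp only [aBrace, negEver, dFinal, h1', h2', if_false, Bool.and_false, Bool.false_or]
        simpa using ih d

theorem tcl_list_element_py_spec : Claim_equal_tcl_list_element_py := by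
  intro s _
  unfold Spec_tcl_list_element_py tcl_list_element_py tcl_list_element_py_alt
  by_cases hs : s = ""
  · simp [hs]
  · simp only [hs, if_false]
    rw [foldl_bStep_char]
    by_cases hn : aNeeds s.toList = false
    · simp [hn]
    · simp only [Bool.false_or, List.nil_append]
      have hb := aBrace_bad s.toList 0
      rw [if_neg hn, if_neg hn]
      rcases hB : (negEver s.toList 0 || (dFinal s.toList 0 != 0)) with _ | _
      · rw [hB] at hb
        simp only [Bool.or_eq_false_iff, bne_eq_false_iff_eq] at hb hB
        simp [hb.1, hb.2, hB.1, hB.2]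
      · rw [hB] at hb
        have hA : (if (aBrace s.toList 0).2 = true then true
            else if ((aBrace s.toList 0).1 != 0) = true then true else false) = true := by
          rcases Bool.or_eq_true _ _ |>.mp hb with h | h
          · simp [h]
          · by_cases h2 : (aBrace s.toList 0).2 = true <;> simp [h2, h]
        have hC : ¬ (dFinal s.toList 0 = 0 ∧ negEver s.toList 0 = false) := by
          rintro ⟨hd, hng⟩
          simp [hd, hng] at hB
        rw [if_neg (by simp only [hA]; simp), if_neg hC]
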